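-- pv_equiv track=rewrite | github.com/AET-CS/aet-cs.github.io | convert_md_titles.py | convert_content
-- ===== SOURCE A (Python) =====
-- def convert_content(content, title):
--     """Convert content by adding front matter and removing H1."""
--     lines = content.split("\n")
--     new_lines = []
--     h1_removed = False
--
--     # Add front matter at the beginning
--     new_lines.append("---")
--     new_lines.append(f'title: "{title}"')
--     new_lines.append("---")
--     new_lines.append("")  # Empty line after front matter
--
--     # Process existing content, removing the first H1
--     for line in lines:
--         if not h1_removed and line.strip().startswith("# "):
--             h1_removed = True
--             continue  # Skip this line
--         new_lines.append(line)
--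
--     return "\n".join(new_lines)
-- ===== SOURCE B (Python) =====
-- def convert_content(content, title):
--     """Convert content by adding front matter and removing H1.
--
--     String-surgery version: never builds a list of lines; scans the raw
--     string with find('\n') and removes the first H1 line by slicing."""
--     front = '---\ntitle: "' + title + '"\n---\n'
--     pos = 0
--     while True:
--         end = content.find("\n", pos)
--         line = content[pos:] if end == -1 else content[pos:end]
--         if line.strip().startswith("# "):
--             if end != -1:
--                 return front + "\n" + content[:pos] + content[end + 1:]
--             if pos > 0:
--                 return front + "\n" + content[:pos - 1]
--             return front
--         if end == -1:
--             return front + "\n" + content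
--         pos = end + 1
-- ===== Notes on version B (the rewrite author's own statement) =====
-- stated objective: alternative
-- what changed: B never builds a list of lines: it scans the raw string with find('\n') from a moving position and removes the first H1 line by slicing the original string (content[:pos] + content[end+1:]), joining nothing; A splits into a line list, filters with a skip-flag loop, and re-joins.
import Mathlib
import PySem

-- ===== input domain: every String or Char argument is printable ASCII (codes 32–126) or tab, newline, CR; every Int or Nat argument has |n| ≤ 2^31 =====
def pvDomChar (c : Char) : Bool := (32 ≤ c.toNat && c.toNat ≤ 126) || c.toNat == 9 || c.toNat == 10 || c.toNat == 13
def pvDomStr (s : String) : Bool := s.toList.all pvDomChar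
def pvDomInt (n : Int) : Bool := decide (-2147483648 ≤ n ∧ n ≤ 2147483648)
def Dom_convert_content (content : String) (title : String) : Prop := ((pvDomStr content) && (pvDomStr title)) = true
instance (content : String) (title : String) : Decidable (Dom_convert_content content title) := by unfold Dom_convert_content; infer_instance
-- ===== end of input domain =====

-- B does string surgery on the raw text (find('\n') + slicing) instead of A's split/filter/join over a line list (objective: alternative).

-- line.strip().startswith("# ") on chars
def pvIsH1c (line : List Char) : Bool := PySem.Chars.startswith (PySem.Chars.strip line) "# ".toList

-- the same predicate on a String (A's lines are Strings)
def pvIsH1 (line : String) : Bool := PySem.Str.startswith (PySem.Str.strip line) "# "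

-- ===== PORT A =====
def convert_content (content : String) (title : String) : String :=
  let lines := (PySem.Str.split? content "\n").getD []
  let new_lines : List String := ["---", "title: \"" ++ title ++ "\"", "---", ""]
  let st := lines.foldl
    (fun (st : List String × Bool) line =>
      if !st.2 && pvIsH1 line then (st.1, true)
      else (st.1 ++ [line], st.2))
    (new_lines, false)
  PySem.Str.join "\n" st.1

-- ===== PORT B =====
-- front = '---\ntitle: "' + title + '"\n---\n'
def pvFront (title : String) : List Char :=
  "---\ntitle: \"".toList ++ title.toList ++ "\"\n---\n".toList

-- B's while loop over the moving position pos; content.find("\n", pos) is ported as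
-- findIdx? on the suffix (d is the offset, pos + d the absolute index end);
-- the slices content[:pos], content[pos:end], content[end+1:] are take/drop with
-- the same (nonnegative, in-range) indices, where they are exact.
def pvBLoop (cs front : List Char) (pos : Nat) : List Char :=
  match h : (cs.drop pos).findIdx? (· == '\n') with
  | some d =>
      if pvIsH1c ((cs.drop pos).take d) then
        front ++ '\n' :: (cs.take pos ++ cs.drop (pos + d + 1))
      else pvBLoop cs front (pos + d + 1)
  | none =>
      if pvIsH1c (cs.drop pos) then
        if 0 < pos then front ++ '\n' :: cs.take (pos - 1) else front
      else front ++ '\n' :: cs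
termination_by cs.length - pos
decreasing_by
  have hd := (List.findIdx?_eq_some_iff_getElem.mp h).1
  simp only [List.length_drop] at hd
  omega

def convert_content_alt (content : String) (title : String) : String :=
  String.ofList (pvBLoop content.toList (pvFront title) 0)

-- ===== PRECONDITION & SPEC =====
def Spec_convert_content (content : String) (title : String) (out : String) : Prop := out = convert_content_alt content title
instance (content : String) (title : String) (out : String) : Decidable (Spec_convert_content content title out) := by unfold Spec_convert_content; infer_instance

-- ===== CLAIM (what is proved, stated in full; the proofs are below) =====
def Claim_equal_convert_content : Prop := ∀ (content : String) (title : String), Dom_convert_content content title → Spec_convert_content content title (convert_content content title)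

-- ===== LEMMAS AND PROOFS =====

-- the four front-matter lines, as char lists
def pvHdr (title : String) : List (List Char) :=
  ["---".toList, "title: \"".toList ++ title.toList ++ "\"".toList, "---".toList, []]

-- remove the first H1 line from a list of lines
def pvRm (ls : List (List Char)) : List (List Char) :=
  match ls.findIdx? pvIsH1c with
  | some i => ls.take i ++ ls.drop (i + 1)
  | none => ls

lemma pvIsH1_toList (s : String) : pvIsH1 s = pvIsH1c s.toList := by
  simp [pvIsH1, pvIsH1c, PySem.Str.startswith, PySem.Str.toList_strip]

-- PySem's splitOn with the one-char separator '\n' is Mathlib's splitOnP (· == '\n')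
lemma pvSplit_go (fuel : Nat) (l cur : List Char) (acc : List (List Char)) (h : l.length ≤ fuel) :
    PySem.Chars.splitOn.go ['\n'] fuel l cur acc
      = acc.reverse ++ (List.splitOnP (· == '\n') l).modifyHead (cur.reverse ++ ·) := by
  induction fuel generalizing l cur acc with
  | zero =>
    have hl : l = [] := List.length_eq_zero_iff.mp (Nat.le_zero.mp h)
    subst hl
    rw [PySem.Chars.splitOn.go.eq_def]
    simp [List.splitOnP_nil]
  | succ fuel ih =>
    cases l with
    | nil =>
      rw [PySem.Chars.splitOn.go.eq_def]
      simp [List.splitOnP_nil]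
    | cons c rest =>
      rw [PySem.Chars.splitOn.go.eq_def]
      simp only [List.length_cons] at h
      by_cases hc : c = '\n'
      · subst hc
        have hp : List.isPrefixOf ['\n'] ('\n' :: rest) = true := by
          simp [List.isPrefixOf]
        simp only [hp, if_true]
        rw [show List.drop ['\n'].length ('\n' :: rest) = rest from rfl]
        rw [ih rest [] _ (by omega)]
        rw [List.splitOnP_cons]
        simp only [beq_self_eq_true, if_true]
        cases hs : List.splitOnP (fun x => x == '\n') rest <;> simp
      · have hp : List.isPrefixOf ['\n'] (c :: rest) = false := by
          simp [List.isPrefixOf]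
          intro h'; exact absurd h'.symm hc
        simp only [hp, Bool.false_eq_true, if_false]
        rw [ih rest (c :: cur) acc (by omega)]
        rw [List.splitOnP_cons, if_neg (by simp [hc]), List.modifyHead_modifyHead]
        congr 1
        cases hs : List.splitOnP (fun x => x == '\n') rest <;> simp

lemma pvSplit (s : List Char) :
    PySem.Chars.splitOn s ['\n'] = List.splitOnP (· == '\n') s := by
  rw [PySem.Chars.splitOn, pvSplit_go _ _ _ _ (by omega)]
  simp [List.modifyHead]
  cases hs : List.splitOnP (fun x => x == '\n') s <;> simp

-- join over an appended prefix of lines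
lemma pvJoin_append (pl body : List (List Char)) (h : body ≠ []) :
    PySem.Chars.join ['\n'] (pl ++ body)
      = (pl.map (· ++ ['\n'])).flatten ++ PySem.Chars.join ['\n'] body := by
  induction pl with
  | nil => simp
  | cons p pl ih =>
    cases pl with
    | nil =>
      cases body with
      | nil => exact absurd rfl h
      | cons b bs => rw [List.singleton_append, PySem.Chars.join_cons_cons]; simp
    | cons q ql =>
      simp only [List.cons_append]
      rw [PySem.Chars.join_cons_cons]
      rw [show q :: (ql ++ body) = (q :: ql) ++ body from rfl, ih]
      simp

-- the flattened prefix, joined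
lemma pvFlatten_join (pl : List (List Char)) (h : pl ≠ []) :
    (pl.map (· ++ ['\n'])).flatten = PySem.Chars.join ['\n'] pl ++ ['\n'] := by
  induction pl with
  | nil => exact absurd rfl h
  | cons p pl ih =>
    cases pl with
    | nil => simp [PySem.Chars.join, List.intercalate]
    | cons q ql =>
      rw [List.map_cons, List.flatten_cons, ih (by simp), PySem.Chars.join_cons_cons]
      simp

-- removal skips a non-H1 head line
lemma pvRm_cons_neg (l : List Char) (ls : List (List Char)) (h : ¬ pvIsH1c l = true) :
    pvRm (l :: ls) = l :: pvRm ls := by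
  unfold pvRm
  rw [List.findIdx?_cons]
  simp only [h]
  cases hf : ls.findIdx? pvIsH1c with
  | none => simp
  | some i => simp

lemma pvRm_cons_pos (l : List Char) (ls : List (List Char)) (h : pvIsH1c l = true) :
    pvRm (l :: ls) = ls := by
  unfold pvRm
  rw [List.findIdx?_cons]
  simp [h]

-- front-matter algebra
lemma pvFront_flatten (title : String) :
    ((pvHdr title).map (· ++ ['\n'])).flatten = pvFront title ++ ['\n'] := by
  simp [pvHdr, pvFront]

lemma pvFront_join (title : String) :
    PySem.Chars.join ['\n'] (pvHdr title) = pvFront title := by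
  simp only [pvHdr]
  rw [PySem.Chars.join_cons_cons, PySem.Chars.join_cons_cons, PySem.Chars.join_cons_cons]
  simp [PySem.Chars.join, List.intercalate, pvFront]

-- join over a full split is the original text
lemma pvJoin_split (x : List Char) :
    PySem.Chars.join ['\n'] (List.splitOnP (· == '\n') x) = x := by
  have h := List.intercalate_splitOn x '\n'
  rw [List.splitOn] at h
  exact h

-- one-step unfoldings of B's loop
lemma pvBLoop_none (cs front : List Char) (pos : Nat)
    (hf : (cs.drop pos).findIdx? (· == '\n') = none) :
    pvBLoop cs front pos
      = if pvIsH1c (cs.drop pos) then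
          (if 0 < pos then front ++ '\n' :: cs.take (pos - 1) else front)
        else front ++ '\n' :: cs := by
  rw [pvBLoop]
  split
  · next d h => rw [hf] at h; cases h
  · rfl

lemma pvBLoop_some (cs front : List Char) (pos d : Nat)
    (hf : (cs.drop pos).findIdx? (· == '\n') = some d) :
    pvBLoop cs front pos
      = if pvIsH1c ((cs.drop pos).take d) then
          front ++ '\n' :: (cs.take pos ++ cs.drop (pos + d + 1))
        else pvBLoop cs front (pos + d + 1) := by
  rw [pvBLoop]
  split
  · next d' h =>
    rw [hf] at h
    cases h
    rfl
  · next h => rw [hf] at h; cases h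

-- the no-more-newline case of the loop, against the spec
lemma pvCaseNone (title : String) (rest pre : List Char) (pl : List (List Char))
    (hpre : pre = (pl.map (· ++ ['\n'])).flatten)
    (hh1 : ∀ l ∈ pl, ¬ pvIsH1c l = true)
    (hf : rest.findIdx? (· == '\n') = none) :
    pvBLoop (pre ++ rest) (pvFront title) pre.length
      = PySem.Chars.join ['\n'] (pvHdr title ++ pl ++ pvRm (List.splitOnP (· == '\n') rest)) := by
  have hdrop : (pre ++ rest).drop pre.length = rest := List.drop_left
  have hsingle : List.splitOnP (· == '\n') rest = [rest] :=
    List.splitOnP_eq_single _ _ (by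
      intro x hx
      have := List.findIdx?_eq_none_iff.mp hf x hx
      simpa using this)
  rw [pvBLoop_none _ _ _ (by rw [hdrop]; exact hf), hdrop, hsingle]
  by_cases hH : pvIsH1c rest = true
  · rw [if_pos hH, pvRm_cons_pos _ _ hH]
    cases pl with
    | nil =>
      have hpre0 : pre = [] := by simpa using hpre
      subst hpre0
      simp
      exact (pvFront_join title).symm
    | cons p pl' =>
      have hflat : pre = PySem.Chars.join ['\n'] (p :: pl') ++ ['\n'] :=
        hpre.trans (pvFlatten_join _ (by simp))
      have hpos : 0 < pre.length := by
        rw [hflat, List.length_append]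
        simp
      rw [if_pos hpos]
      have htake : (pre ++ rest).take (pre.length - 1) = PySem.Chars.join ['\n'] (p :: pl') := by
        rw [List.take_append, show pre.length - 1 - pre.length = 0 by omega, List.take_zero,
          List.append_nil, hflat]
        rw [show (PySem.Chars.join ['\n'] (p :: pl') ++ ['\n']).length - 1
            = (PySem.Chars.join ['\n'] (p :: pl')).length by simp]
        exact List.take_left
      rw [htake, List.append_nil, pvJoin_append _ _ (by simp), pvFront_flatten]
      simp
  · rw [if_neg hH]
    have hrm : pvRm [rest] = [rest] := by
      rw [pvRm_cons_neg _ _ hH]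
      rfl
    rw [hrm, List.append_assoc, pvJoin_append _ _ (by simp), pvFront_flatten,
      pvJoin_append _ _ (by simp)]
    rw [show PySem.Chars.join ['\n'] [rest] = rest by simp [PySem.Chars.join, List.intercalate]]
    rw [hpre]
    simp

-- ===== the main loop lemma for B =====
lemma pvBLoop_eq (title : String) : ∀ (n : Nat) (rest pre : List Char) (pl : List (List Char)),
    rest.length ≤ n →
    pre = (pl.map (· ++ ['\n'])).flatten →
    (∀ l ∈ pl, '\n' ∉ l) →
    (∀ l ∈ pl, ¬ pvIsH1c l = true) →
    pvBLoop (pre ++ rest) (pvFront title) pre.length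
      = PySem.Chars.join ['\n'] (pvHdr title ++ pl ++ pvRm (List.splitOnP (· == '\n') rest)) := by
  intro n
  induction n with
  | zero =>
    intro rest pre pl hlen hpre hnl hh1
    have hr : rest = [] := List.length_eq_zero_iff.mp (Nat.le_zero.mp hlen)
    subst hr
    exact pvCaseNone title [] pre pl hpre hh1 (by simp)
  | succ n ih =>
    intro rest pre pl hlen hpre hnl hh1
    cases hf : rest.findIdx? (· == '\n') with
    | none => exact pvCaseNone title rest pre pl hpre hh1 hf
    | some d =>
      obtain ⟨hd, hsep, hmin⟩ := List.findIdx?_eq_some_iff_getElem.mp hf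
      have hsep' : rest[d] = '\n' := by simpa using hsep
      have hdrop : (pre ++ rest).drop pre.length = rest := List.drop_left
      have hlnl : '\n' ∉ rest.take d := by
        intro hm
        obtain ⟨j, hj, hje⟩ := List.getElem_of_mem hm
        have hjd : j < d := by
          have := hj
          simp [List.length_take] at this
          omega
        have : rest[j] = '\n' := by
          rw [← hje, List.getElem_take]
        exact hmin j hjd (by simp [this])
      have hrest_eq : rest = rest.take d ++ '\n' :: rest.drop (d + 1) := by
        conv_lhs => rw [← List.take_append_drop d rest]
        rw [List.drop_eq_getElem_cons hd, hsep']
      have hsplit_rest : List.splitOnP (· == '\n') rest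
          = rest.take d :: List.splitOnP (· == '\n') (rest.drop (d + 1)) := by
        conv_lhs => rw [hrest_eq]
        exact List.splitOnP_first _ _ (by
          intro x hx
          simp only [beq_iff_eq]
          intro he; exact hlnl (he ▸ hx)) '\n' (by simp) _
      rw [pvBLoop_some _ _ _ d (by rw [hdrop]; exact hf), hdrop]
      by_cases hH : pvIsH1c (rest.take d) = true
      · rw [if_pos hH, hsplit_rest, pvRm_cons_pos _ _ hH]
        have htake : (pre ++ rest).take pre.length = pre := List.take_left
        have hdrop2 : (pre ++ rest).drop (pre.length + d + 1) = rest.drop (d + 1) := by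
          rw [List.drop_append, List.drop_eq_nil_of_le (by omega)]
          rw [show pre.length + d + 1 - pre.length = d + 1 by omega]
          rfl
        rw [htake, hdrop2, List.append_assoc,
          pvJoin_append _ _ (by simp [List.splitOnP_ne_nil]), pvFront_flatten,
          pvJoin_append _ _ (List.splitOnP_ne_nil _ _), pvJoin_split, hpre]
        simp
      · rw [if_neg hH]
        have hpre' : pre ++ rest.take d ++ ['\n']
            = ((pl ++ [rest.take d]).map (· ++ ['\n'])).flatten := by
          simp [hpre]
        have hlen' : (rest.drop (d + 1)).length ≤ n := by
          simp only [List.length_drop]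
          omega
        have hcs : pre ++ rest = (pre ++ rest.take d ++ ['\n']) ++ rest.drop (d + 1) := by
          conv_lhs => rw [hrest_eq]
          simp
        have hposlen : (pre ++ rest.take d ++ ['\n']).length = pre.length + d + 1 := by
          simp [List.length_take]
          omega
        have := ih (rest.drop (d + 1)) (pre ++ rest.take d ++ ['\n']) (pl ++ [rest.take d])
          hlen' hpre'
          (by
            intro l hl
            rcases List.mem_append.mp hl with h1 | h1
            · exact hnl l h1
            · simp at h1; subst h1; exact hlnl)
          (by
            intro l hl
            rcases List.mem_append.mp hl with h1 | h1
            · exact hh1 l h1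
            · simp at h1; subst h1; exact hH)
        rw [hposlen] at this
        rw [← hcs] at this
        rw [this, hsplit_rest, pvRm_cons_neg _ _ hH]
        congr 1
        simp

-- once the flag is true, A's loop just appends every remaining line
lemma pv_loop_true (l : List String) (acc : List String) :
    l.foldl (fun (st : List String × Bool) line =>
      if !st.2 && pvIsH1 line then (st.1, true)
      else (st.1 ++ [line], st.2)) (acc, true) = (acc ++ l, true) := by
  induction l generalizing acc with
  | nil => simp
  | cons a l ih =>
    rw [List.foldl_cons]
    have : (if (!(true : Bool) && pvIsH1 a) = true then (acc, true)
            else (acc ++ [a], true)) = ((acc ++ [a]), true) := by simp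
    rw [this, ih]
    simp

-- with the flag false, A's loop removes exactly the first H1 line
lemma pv_loop_false (l : List String) (acc : List String) :
    (l.foldl (fun (st : List String × Bool) line =>
      if !st.2 && pvIsH1 line then (st.1, true)
      else (st.1 ++ [line], st.2)) (acc, false)).1
    = acc ++ (match l.findIdx? pvIsH1 with
              | some i => l.take i ++ l.drop (i + 1)
              | none => l) := by
  induction l generalizing acc with
  | nil => simp
  | cons a l ih =>
    rw [List.foldl_cons]
    by_cases h : pvIsH1 a
    · have : (if (!(false : Bool) && pvIsH1 a) = true then (acc, true)
              else (acc ++ [a], false)) = (acc, true) := by simp [h]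
      rw [this, pv_loop_true, List.findIdx?_cons]
      simp [h]
    · have : (if (!(false : Bool) && pvIsH1 a) = true then (acc, true)
              else (acc ++ [a], false)) = ((acc ++ [a]), false) := by simp [h]
      rw [this, ih, List.findIdx?_cons]
      simp only [h, Bool.false_eq_true, if_false]
      cases hf : l.findIdx? pvIsH1 with
      | none => simp
      | some i => simp [List.take_succ_cons, List.drop_succ_cons]

-- A's result, on the char level
lemma pvA_chars (content title : String) :
    (convert_content content title).toList
      = PySem.Chars.join ['\n'] (pvHdr title ++ pvRm (List.splitOnP (· == '\n') content.toList)) := by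
  have hnl : ("\n" : String).toList = ['\n'] := rfl
  have hsplit : ((PySem.Str.split? content "\n").getD []).map String.toList
      = List.splitOnP (· == '\n') content.toList := by
    have h := PySem.Str.split?_map content "\n"
    rw [hnl] at h
    rw [show PySem.Chars.split? content.toList ['\n']
        = some (PySem.Chars.splitOn content.toList ['\n']) by simp [PySem.Chars.split?]] at h
    cases hs : PySem.Str.split? content "\n" with
    | none => rw [hs] at h; simp at h
    | some ls =>
      rw [hs] at h
      simp only [Option.map_some, Option.some.injEq] at h
      rw [Option.getD_some]
      exact h.trans (pvSplit _)
  have hidx : ∀ (ls : List String),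
      ls.findIdx? pvIsH1 = (ls.map String.toList).findIdx? pvIsH1c := by
    intro ls
    rw [List.findIdx?_map]
    congr 1
    funext s
    exact pvIsH1_toList s
  simp only [convert_content]
  rw [pv_loop_false, PySem.Str.toList_join, hnl, List.map_append]
  congr 1
  congr 1
  · simp [pvHdr]
  · rw [hidx, hsplit]
    unfold pvRm
    cases hf : (List.splitOnP (· == '\n') content.toList).findIdx? pvIsH1c with
    | none => simp [hsplit]
    | some i => simp [List.map_append, List.map_take, List.map_drop, hsplit]

-- ===== VERDICT (by name: the statement is the Claim_ definition above) =====
theorem convert_content_spec : Claim_equal_convert_content := by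
  intro content title _
  unfold Spec_convert_content
  apply String.ext
  rw [pvA_chars]
  show _ = (String.ofList (pvBLoop content.toList (pvFront title) 0)).toList
  rw [String.toList_ofList]
  have := pvBLoop_eq title content.toList.length content.toList [] [] (le_refl _) (by simp) (by simp) (by simp)
  simp only [List.nil_append, List.length_nil] at this
  rw [this]
  simp
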